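-- pv_equiv track=rewrite | github.com/jojonicho/algorithms | rokedamu/b2.py | find_falling_trees
-- ===== SOURCE A (Python) =====
-- def find_falling_trees(X, H):
--     st = []
--     n = len(X)
--     ans = [0] * n
--     for i in range(n - 1, -1, -1):
--         distance = X[i] + H[i]
--         while len(st) > 0 and distance >= st[-1][0]:
--             cur = st.pop()
--             distance = max(distance, cur[1])
--         st.append((X[i], distance))
--         ans[i] = distance
--     return ans
-- ===== SOURCE B (Python) =====
-- def find_falling_trees(X, H):
--     # Build the answer right-to-left over the zipped trees, keeping the full
--     # list of (position, reach) pairs to the right and scanning it directly.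
--     tail = []  # (position, reach) for already-processed trees, left-to-right
--     for x, h in reversed(list(zip(X, H))):
--         d = x + h
--         for xj, aj in tail:
--             if xj > d:
--                 break
--             if aj > d:
--                 d = aj
--         tail.insert(0, (x, d))
--     return [a for _, a in tail]
-- ===== Notes on version B (the rewrite author's own statement) =====
-- stated objective: simpler
-- what changed: Drops the monotone stack: B folds right-to-left over the zipped (position, height) pairs, keeping the full list of (position, reach) pairs of already-processed trees and computing each reach by a direct scan of that list with an early break, then projects the reaches out.
-- outside the precondition, e.g. on find_falling_trees([1, 2], [3]): A raises IndexError, B returns [4]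
import Mathlib
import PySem

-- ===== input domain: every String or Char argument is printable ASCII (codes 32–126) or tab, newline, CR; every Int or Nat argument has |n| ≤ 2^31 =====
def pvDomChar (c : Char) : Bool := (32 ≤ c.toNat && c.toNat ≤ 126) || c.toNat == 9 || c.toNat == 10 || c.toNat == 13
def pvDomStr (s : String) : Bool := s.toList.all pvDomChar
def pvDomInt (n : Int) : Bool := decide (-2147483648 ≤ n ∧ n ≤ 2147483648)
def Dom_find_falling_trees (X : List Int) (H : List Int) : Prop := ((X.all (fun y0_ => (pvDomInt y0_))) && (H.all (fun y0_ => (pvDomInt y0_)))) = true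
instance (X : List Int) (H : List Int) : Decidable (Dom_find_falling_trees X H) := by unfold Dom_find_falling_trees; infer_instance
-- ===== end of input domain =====

-- B replaces A's monotone stack by a right-to-left fold over the zipped trees that scans the
-- full list of already-computed (position, reach) pairs directly (simpler; no stack pruning).


-- ===== PORT A =====
-- A's inner while loop: pop while distance ≥ top's x, folding in the popped distance.
-- Stack is head-is-top; returns (final distance, remaining stack).
def pvPopA (d : Int) : List (Int × Int) → Int × List (Int × Int)
  | [] => (d, [])
  | (x, dd) :: st => if x ≤ d then pvPopA (max d dd) st else (d, (x, dd) :: st)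

-- A's main loop, i = k-1 down to 0; `ans` holds ans[k..n-1] (assignments at descending i = prepends).
def pvGoA (X H : List Int) : Nat → List (Int × Int) → List Int → List Int
  | 0, _, ans => ans
  | k + 1, st, ans =>
      let d0 := X.getD k 0 + H.getD k 0
      let p := pvPopA d0 st
      pvGoA X H k ((X.getD k 0, p.1) :: p.2) (p.1 :: ans)

def find_falling_trees (X : List Int) (H : List Int) : List Int :=
  pvGoA X H X.length [] []

-- ===== PORT B =====
-- B's inner for-loop over `tail` with break.
def pvScanB (d : Int) : List (Int × Int) → Int
  | [] => d
  | (xj, aj) :: rest => if xj > d then d else pvScanB (if aj > d then aj else d) rest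

-- B's loop body for one (x, h) pair: scan, then prepend (x, d).
def pvStepB (p : Int × Int) (tail : List (Int × Int)) : List (Int × Int) :=
  (p.1, pvScanB (p.1 + p.2) tail) :: tail

-- `for x, h in reversed(list(zip(X, H)))` accumulating at the front = foldr over the zip.
def find_falling_trees_alt (X : List Int) (H : List Int) : List Int :=
  (((X.zip H).foldr pvStepB []).map Prod.snd)

-- ===== PRECONDITION & SPEC =====
-- Pre_ excludes exactly the inputs where Python A raises IndexError: H shorter than X.
def Pre_find_falling_trees (X : List Int) (H : List Int) : Prop := X.length ≤ H.length
instance (X : List Int) (H : List Int) : Decidable (Pre_find_falling_trees X H) := by unfold Pre_find_falling_trees; infer_instance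
def pvWitness_find_falling_trees : List Int × List Int := ([3, 1], [2, 5])

def Spec_find_falling_trees (X : List Int) (H : List Int) (out : List Int) : Prop := out = find_falling_trees_alt X H
instance (X : List Int) (H : List Int) (out : List Int) : Decidable (Spec_find_falling_trees X H out) := by unfold Spec_find_falling_trees; infer_instance

-- ===== CLAIM (what is proved, stated in full; the proofs are below) =====
def Claim_equal_find_falling_trees : Prop := ∀ (X : List Int) (H : List Int), Dom_find_falling_trees X H → Pre_find_falling_trees X H → Spec_find_falling_trees X H (find_falling_trees X H)

-- ===== LEMMAS AND PROOFS =====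

-- popping only grows the distance
theorem pvPopA_ge (st : List (Int × Int)) (d : Int) : d ≤ (pvPopA d st).1 := by
  induction st generalizing d with
  | nil => simp [pvPopA]
  | cons p t ih =>
      obtain ⟨x, dd⟩ := p
      simp only [pvPopA]
      split
      · exact le_trans (le_max_left d dd) (ih (max d dd))
      · simp

-- popping with a distance ≥ the result of an earlier pop skips the leftover stack identically
theorem pvPopA_absorb (st : List (Int × Int)) (d0 d : Int)
    (h : (pvPopA d0 st).1 ≤ d) : pvPopA d (pvPopA d0 st).2 = pvPopA d st := by
  induction st generalizing d0 with
  | nil => simp [pvPopA]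
  | cons p t ih =>
      obtain ⟨x, dd⟩ := p
      simp only [pvPopA]
      by_cases hx : x ≤ d0
      · simp only [pvPopA, hx, if_pos] at h ⊢
        have hge := pvPopA_ge t (max d0 dd)
        have hxd : x ≤ d := le_trans hx (le_trans (le_trans (le_max_left d0 dd) hge) h)
        have hdd : dd ≤ d := le_trans (le_trans (le_max_right d0 dd) hge) h
        rw [if_pos hxd, max_eq_left hdd]
        exact ih (max d0 dd) h
      · simp [pvPopA, hx]

-- core invariant step: if the stack and the tail agree under pop/scan for all d,
-- they still agree after processing one more tree
theorem pvStep (st : List (Int × Int)) (tail : List (Int × Int)) (x d0 : Int)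
    (inv : ∀ d, (pvPopA d st).1 = pvScanB d tail) (d : Int) :
    (pvPopA d ((x, (pvPopA d0 st).1) :: (pvPopA d0 st).2)).1
      = pvScanB d ((x, (pvPopA d0 st).1) :: tail) := by
  simp only [pvPopA, pvScanB]
  by_cases hx : x ≤ d
  · rw [if_pos hx, if_neg (by omega : ¬ x > d)]
    have hmax : (if (pvPopA d0 st).1 > d then (pvPopA d0 st).1 else d)
        = max d (pvPopA d0 st).1 := by split <;> omega
    rw [hmax]
    have habs : pvPopA (max d (pvPopA d0 st).1) (pvPopA d0 st).2
        = pvPopA (max d (pvPopA d0 st).1) st :=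
      pvPopA_absorb st d0 _ (le_max_right _ _)
    rw [habs]
    exact inv _
  · rw [if_neg hx, if_pos (by omega : x > d)]

-- main loop correspondence: A's loop with stack st equals B's fold over the remaining zip
theorem pvGo_eq (X H : List Int) (hlen : X.length ≤ H.length) (k : Nat) (hk : k ≤ X.length)
    (st : List (Int × Int))
    (inv : ∀ d, (pvPopA d st).1 = pvScanB d (((X.zip H).drop k).foldr pvStepB [])) :
    pvGoA X H k st ((((X.zip H).drop k).foldr pvStepB []).map Prod.snd)
      = ((X.zip H).foldr pvStepB []).map Prod.snd := by
  induction k generalizing st with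
  | zero => simp [pvGoA]
  | succ k ih =>
      have hkx : k < X.length := hk
      have hkz : k < (X.zip H).length := by
        rw [List.length_zip]; omega
      have hdrop : (X.zip H).drop k = (X.getD k 0, H.getD k 0) :: (X.zip H).drop (k + 1) := by
        have h1 : (X.zip H)[k] = (X[k], H[(k : Nat)]'(by omega)) := List.getElem_zip
        rw [← List.getElem_cons_drop hkz, h1,
            List.getD_eq_getElem?_getD, List.getElem?_eq_getElem hkx,
            List.getD_eq_getElem?_getD (l := H), List.getElem?_eq_getElem (by omega : k < H.length)]
        rfl
      have hstep : ((X.zip H).drop k).foldr pvStepB []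
          = (X.getD k 0, pvScanB (X.getD k 0 + H.getD k 0)
              (((X.zip H).drop (k+1)).foldr pvStepB []))
            :: ((X.zip H).drop (k+1)).foldr pvStepB [] := by
        rw [hdrop]; rfl
      have hd := inv (X.getD k 0 + H.getD k 0)
      simp only [pvGoA]
      have hans : (pvPopA (X.getD k 0 + H.getD k 0) st).1
            :: ((((X.zip H).drop (k+1)).foldr pvStepB []).map Prod.snd)
          = (((X.zip H).drop k).foldr pvStepB []).map Prod.snd := by
        rw [hstep, List.map_cons, ← hd]
      rw [hans]
      exact ih (le_of_lt hkx)
        ((X.getD k 0, (pvPopA (X.getD k 0 + H.getD k 0) st).1)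
          :: (pvPopA (X.getD k 0 + H.getD k 0) st).2)
        (by intro d; rw [hstep, ← hd]; exact pvStep st _ _ _ inv d)

-- ===== VERDICT (by name: the statement is the Claim_ definition above) =====
theorem find_falling_trees_spec : Claim_equal_find_falling_trees := by
  intro X H _ hpre
  unfold Spec_find_falling_trees find_falling_trees find_falling_trees_alt
  have h0 : (X.zip H).drop X.length = [] := by
    apply List.drop_eq_nil_of_le
    rw [List.length_zip]; omega
  have := pvGo_eq X H hpre X.length le_rfl []
    (by intro d; rw [h0]; simp [pvPopA, pvScanB])
  rw [h0] at this
  simpa using this
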